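-- pv_equiv track=rewrite | github.com/franzimbi/TeoriaDeAlgoritmos1 | tp1/personal.py | ordenarCandidatos
-- ===== SOURCE A (Python) =====
-- def ordenarCandidatos(candidatos, cantidadTareas):  # O(C * T)
--     ordenPorCantidad = list([] for _ in range(cantidadTareas)) # O(T) t: cantidad de tareas
--     contador = [0]*cantidadTareas # O(n) n: cantidad de candidatos
--     puestosUnicos = set()
--     for candidato in candidatos: #O (n)
--         ordenPorCantidad[len(candidato)-1].append(candidato)
--         for tarea in candidato:
--             if tarea!=candidato[0]:
--                 contador[tarea-1] += 1
--     for i in range(len(contador)): # O(T)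
--         if contador[i] == 1:
--             puestosUnicos.add(i+1)
--     res = []
--     for i in range(len(ordenPorCantidad)-1, 0 , -1):  # O(n)
--         for candidato in ordenPorCantidad[i]: # O(T)
--             agregado = False
--             for c in candidato:
--                 if c in puestosUnicos:
--                     res.insert(0, candidato)
--                     agregado = True
--                     break
--             if not agregado:
--                 res.append(candidato)
--     return res
-- ===== SOURCE B (Python) =====
-- def ordenarCandidatos(candidatos, cantidadTareas):
--     contador = [0] * cantidadTareas
--     for cand in candidatos:
--         for t in cand:
--             if t != cand[0]:
--                 contador[t - 1] += 1
--     unicos = {i + 1 for i in range(cantidadTareas) if contador[i] == 1}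
--     orden = sorted([c for c in candidatos if len(c) > 1], key=len, reverse=True)
--     destacados = [c for c in orden if any(t in unicos for t in c)]
--     comunes = [c for c in orden if not any(t in unicos for t in c)]
--     destacados.reverse()
--     return destacados + comunes
-- ===== Notes on version B (the rewrite author's own statement) =====
-- stated objective: alternative
-- what changed: B keeps the counting pass but replaces A's preallocated length-bucket array walked top-down with repeated quadratic res.insert(0) by one stable descending sort by length for the processing order and two filtered sublists joined after a single reverse; Pre_ additionally excludes empty candidates, which A files into the top length bucket through Python's [-1] wraparound while B drops them like every other candidate of length < 2.
-- outside the precondition, e.g. on ordenarCandidatos([[]], 2): A returns [[]], B returns []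
import Mathlib
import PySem

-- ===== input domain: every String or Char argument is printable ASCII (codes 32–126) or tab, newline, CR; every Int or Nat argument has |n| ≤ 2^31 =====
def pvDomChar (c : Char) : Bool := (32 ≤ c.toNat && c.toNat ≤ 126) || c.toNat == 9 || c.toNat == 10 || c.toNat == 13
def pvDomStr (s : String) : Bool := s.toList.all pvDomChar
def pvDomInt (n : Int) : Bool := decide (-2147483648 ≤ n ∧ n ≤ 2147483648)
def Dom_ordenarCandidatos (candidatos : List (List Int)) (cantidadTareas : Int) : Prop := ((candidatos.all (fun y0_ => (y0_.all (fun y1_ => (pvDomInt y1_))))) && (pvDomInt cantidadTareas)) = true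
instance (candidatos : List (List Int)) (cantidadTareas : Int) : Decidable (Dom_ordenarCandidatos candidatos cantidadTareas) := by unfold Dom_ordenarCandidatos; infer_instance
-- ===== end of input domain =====

-- B keeps A's counting pass but drops the length-bucket array and the quadratic res.insert(0):
-- it obtains the processing order by ONE stable descending sort by length and assembles the answer
-- from two filtered sublists plus a single reverse (alternative second half).

-- ===== PORT A =====

-- first pass: build the length buckets and the task counter (one loop, a pair state)
def paPass1 (cantidadTareas : Int) (candidatos : List (List Int)) : List (List (List Int)) × List Int :=
  candidatos.foldl (fun st cand =>
      (PySem.List.pySetD st.1 (PySem.List.len cand - 1)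
         (PySem.List.pyGetD st.1 (PySem.List.len cand - 1) [] ++ [cand]),
       cand.foldl (fun ct t =>
         if t ≠ PySem.List.pyGetD cand 0 0 then
           PySem.List.pySetD ct (t - 1) (PySem.List.pyGetD ct (t - 1) 0 + 1)
         else ct) st.2))
    ((PySem.List.pyRange 0 cantidadTareas 1).map (fun _ => []), PySem.List.pyRepeat [0] cantidadTareas)

-- puestosUnicos = {i+1 : contador[i] == 1}
def paUnicos (contador : List Int) : PySem.Set Int :=
  (PySem.List.pyRange 0 (PySem.List.len contador) 1).foldl
    (fun s i => if PySem.List.pyGetD contador i 0 = 1 then PySem.Set.add s (i + 1) else s)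
    PySem.Set.empty

-- the inner 'for c in candidato: if c in puestosUnicos: res.insert(0, candidato); break' loop
def paScan (unicos : PySem.Set Int) (cand : List Int) (res : List (List Int)) :
    List Int → List (List Int) × Bool
  | [] => (res, false)
  | c :: rest =>
      if PySem.Set.contains unicos c then (cand :: res, true)
      else paScan unicos cand res rest

-- one candidate of a bucket: scan, then 'if not agregado: res.append(candidato)'
def paStep (unicos : PySem.Set Int) (res : List (List Int)) (cand : List Int) : List (List Int) :=
  let r := paScan unicos cand res cand
  if !r.2 then r.1 ++ [cand] else r.1

def ordenarCandidatos (candidatos : List (List Int)) (cantidadTareas : Int) : List (List Int) :=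
  let p := paPass1 cantidadTareas candidatos
  let unicos := paUnicos p.2
  (PySem.List.pyRange (PySem.List.len p.1 - 1) 0 (-1)).foldl
    (fun res i => (PySem.List.pyGetD p.1 i []).foldl (paStep unicos) res) []

-- ===== PORT B =====

-- contador[t-1] += 1 for every task differing from the candidate's first one
def pbContador (candidatos : List (List Int)) (cantidadTareas : Int) : List Int :=
  candidatos.foldl (fun ct cand =>
    cand.foldl (fun ct t =>
      if t ≠ PySem.List.pyGetD cand 0 0 then
        PySem.List.pySetD ct (t - 1) (PySem.List.pyGetD ct (t - 1) 0 + 1)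
      else ct) ct)
    (PySem.List.pyRepeat [0] cantidadTareas)

-- unicos = {i+1 for i in range(cantidadTareas) if contador[i] == 1}
def pbUnicos (cantidadTareas : Int) (contador : List Int) : PySem.Set Int :=
  (PySem.List.pyRange 0 cantidadTareas 1).foldl
    (fun s i => if PySem.List.pyGetD contador i 0 = 1 then PySem.Set.add s (i + 1) else s)
    PySem.Set.empty

def ordenarCandidatos_alt (candidatos : List (List Int)) (cantidadTareas : Int) : List (List Int) :=
  let unicos := pbUnicos cantidadTareas (pbContador candidatos cantidadTareas)
  let orden := PySem.List.sorted (candidatos.filter (fun c => decide (1 < PySem.List.len c)))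
    (fun c => PySem.List.len c) true
  let destacados := orden.filter (fun c => c.any (fun t => PySem.Set.contains unicos t))
  let comunes := orden.filter (fun c => !c.any (fun t => PySem.Set.contains unicos t))
  destacados.reverse ++ comunes

-- ===== PRECONDITION & SPEC =====
-- Pre_ excludes the inputs on which A raises IndexError (a candidate longer than cantidadTareas, a
-- counted task outside the list-index range, cantidadTareas < 1 with candidates present) and the one
-- corner where A returns through an accident of its indexing: an EMPTY candidate, which A files into
-- the top length bucket via Python's [-1] wraparound while B, like any length-based grouping, drops it.
def Pre_ordenarCandidatos (candidatos : List (List Int)) (cantidadTareas : Int) : Prop :=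
  candidatos = [] ∨
    (1 ≤ cantidadTareas ∧ ∀ cand ∈ candidatos,
      (1 ≤ cand.length ∧ (cand.length : Int) ≤ cantidadTareas) ∧
      ∀ t ∈ cand, t ≠ cand.headI → 1 - cantidadTareas ≤ t ∧ t ≤ cantidadTareas)
instance (candidatos : List (List Int)) (cantidadTareas : Int) : Decidable (Pre_ordenarCandidatos candidatos cantidadTareas) := by unfold Pre_ordenarCandidatos; infer_instance

def pvWitness_ordenarCandidatos : List (List Int) × Int := ([[1, 2], [2], [3, 3], [2, 3, 1]], 3)

def Spec_ordenarCandidatos (candidatos : List (List Int)) (cantidadTareas : Int) (out : List (List Int)) : Prop := out = ordenarCandidatos_alt candidatos cantidadTareas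
instance (candidatos : List (List Int)) (cantidadTareas : Int) (out : List (List Int)) : Decidable (Spec_ordenarCandidatos candidatos cantidadTareas out) := by unfold Spec_ordenarCandidatos; infer_instance

-- ===== CLAIM (what is proved, stated in full; the proofs are below) =====
def Claim_equal_ordenarCandidatos : Prop := ∀ (candidatos : List (List Int)) (cantidadTareas : Int), Dom_ordenarCandidatos candidatos cantidadTareas → Pre_ordenarCandidatos candidatos cantidadTareas → Spec_ordenarCandidatos candidatos cantidadTareas (ordenarCandidatos candidatos cantidadTareas)

-- ===== LEMMAS AND PROOFS =====

-- Python's wrapped list index, as 'mod' of the (positive) length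
theorem pyIdx_mod (T : Int) (n : Nat) (i : Int) (hn : (n : Int) = T)
    (h1 : -T ≤ i) (h2 : i < T) :
    PySem.List.pyIdx? n i = some (PySem.Int.mod i T).toNat := by
  have hT : 1 ≤ T := by omega
  have hm := PySem.Int.mod_eq_emod_of_pos (a := i) (b := T) (by omega)
  unfold PySem.List.pyIdx?
  rw [hm]
  by_cases hi : 0 ≤ i
  · have e : i % T = i := Int.emod_eq_of_lt hi h2
    rw [e, if_pos hi, if_pos (by omega)]
  · have e : i % T = i + T := by
      rw [← Int.add_emod_right i T]
      exact Int.emod_eq_of_lt (by omega) (by omega)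
    rw [e, if_neg hi, if_pos (by omega)]
    congr 1
    omega

theorem wrapGet {α : Type} (T : Int) (xs : List α) (i : Int) (d : α)
    (hn : (xs.length : Int) = T) (h1 : -T ≤ i) (h2 : i < T) :
    PySem.List.pyGetD xs i d = xs.getD (PySem.Int.mod i T).toNat d := by
  have := pyIdx_mod T xs.length i hn h1 h2
  simp [PySem.List.pyGetD, PySem.List.pyGet?, this, List.getD_eq_getElem?_getD]

theorem wrapSet {α : Type} (T : Int) (xs : List α) (i : Int) (v : α)
    (hn : (xs.length : Int) = T) (h1 : -T ≤ i) (h2 : i < T) :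
    PySem.List.pySetD xs i v = xs.set (PySem.Int.mod i T).toNat v := by
  have := pyIdx_mod T xs.length i hn h1 h2
  simp [PySem.List.pySetD, PySem.List.pySet?, this]

theorem mod_bounds (T i : Int) (hT : 1 ≤ T) :
    0 ≤ PySem.Int.mod i T ∧ PySem.Int.mod i T < T :=
  ⟨PySem.Int.mod_nonneg i (by omega), PySem.Int.mod_lt i (by omega)⟩

theorem mod_small (T i : Int) (h0 : 0 ≤ i) (h2 : i < T) : PySem.Int.mod i T = i := by
  rw [PySem.Int.mod_eq_emod_of_pos (by omega)]
  exact Int.emod_eq_of_lt h0 h2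

theorem getD_map_nil (l : List Int) (i : Nat) :
    (l.map (fun _ => ([] : List (List Int)))).getD i [] = [] := by
  rw [List.getD_eq_getElem?_getD]
  rcases h : (l.map (fun _ => ([] : List (List Int))))[i]? with _ | x
  · rfl
  · have := List.mem_of_getElem? h
    simp at this
    simp [this]

theorem pyGetD_map_nil (l : List Int) (i : Int) :
    PySem.List.pyGetD (l.map (fun _ => ([] : List (List Int)))) i [] = [] := by
  unfold PySem.List.pyGetD
  rcases h : PySem.List.pyGet? (l.map (fun _ => ([] : List (List Int)))) i with _ | x
  · rfl
  · have hx := PySem.List.mem_of_pyGet?_eq_some _ h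
    simp only [List.mem_map] at hx
    obtain ⟨_, _, rfl⟩ := hx
    rfl

theorem pyGetD_zero_headI (c : List Int) : PySem.List.pyGetD c 0 0 = c.headI := by
  cases c
  · rfl
  · rw [PySem.List.pyGetD_zero_cons]; rfl

-- the contador loop keeps the counter's length
theorem ctr_len (T : Int) (hT : 1 ≤ T) (lst : List Int) :
    ∀ ct : List Int, ct.length = T.toNat → (∀ t ∈ lst, 1 - T ≤ t ∧ t ≤ T) →
    (lst.foldl (fun ct t =>
        PySem.List.pySetD ct (t - 1) (PySem.List.pyGetD ct (t - 1) 0 + 1)) ct).length = T.toNat := by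
  induction lst with
  | nil => intro ct hlen _; simpa using hlen
  | cons t rest ih =>
      intro ct hlen hb
      have hbt := hb t (by simp)
      have hlen' : (ct.length : Int) = T := by omega
      have hs := wrapSet T ct (t - 1) (PySem.List.pyGetD ct (t - 1) 0 + 1) hlen' (by omega) (by omega)
      simp only [List.foldl_cons, hs]
      exact ih _ (by simpa using hlen) (fun x hx => hb x (by simp [hx]))

-- the bucket loop groups candidates by normalized length slot
theorem bkt_spec (T : Int) (hT : 1 ≤ T) (cs : List (List Int)) :
    ∀ bs : List (List (List Int)), bs.length = T.toNat → (∀ c ∈ cs, (c.length : Int) ≤ T) →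
    (cs.foldl (fun bs c =>
        PySem.List.pySetD bs (PySem.List.len c - 1)
          (PySem.List.pyGetD bs (PySem.List.len c - 1) [] ++ [c])) bs).length = T.toNat ∧
    ∀ i : Nat, i < T.toNat →
      (cs.foldl (fun bs c =>
        PySem.List.pySetD bs (PySem.List.len c - 1)
          (PySem.List.pyGetD bs (PySem.List.len c - 1) [] ++ [c])) bs).getD i []
      = bs.getD i [] ++ cs.filter (fun c => decide (PySem.Int.mod (PySem.List.len c - 1) T = (i : Int))) := by
  induction cs with
  | nil => intro bs hlen _; simpa using hlen
  | cons c rest ih =>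
      intro bs hlen hb
      have hbc := hb c (by simp)
      have hlen' : (bs.length : Int) = T := by omega
      have hcl : PySem.List.len c - 1 = (c.length : Int) - 1 := by
        simp [PySem.List.len_eq]
      have hrange : -T ≤ PySem.List.len c - 1 ∧ PySem.List.len c - 1 < T := by
        constructor <;> (rw [hcl]; omega)
      have hg := wrapGet T bs (PySem.List.len c - 1) [] hlen' hrange.1 hrange.2
      have hs := wrapSet T bs (PySem.List.len c - 1)
        (PySem.List.pyGetD bs (PySem.List.len c - 1) [] ++ [c]) hlen' hrange.1 hrange.2
      have hmb := mod_bounds T (PySem.List.len c - 1) hT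
      set m := (PySem.Int.mod (PySem.List.len c - 1) T).toNat with hm
      have hmlt : m < T.toNat := by omega
      have hset : (bs.set m (PySem.List.pyGetD bs (PySem.List.len c - 1) [] ++ [c])).length = T.toNat := by
        simpa using hlen
      simp only [List.foldl_cons, hs]
      obtain ⟨ihl, ihd⟩ := ih (bs.set m (PySem.List.pyGetD bs (PySem.List.len c - 1) [] ++ [c])) hset
        (fun x hx => hb x (by simp [hx]))
      refine ⟨ihl, ?_⟩
      intro i hilt
      rw [ihd i hilt]
      have hgetset : (bs.set m (PySem.List.pyGetD bs (PySem.List.len c - 1) [] ++ [c])).getD i []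
          = if i = m then bs.getD i [] ++ [c] else bs.getD i [] := by
        rw [List.getD_eq_getElem?_getD, List.getElem?_set]
        by_cases h : i = m
        · rw [if_pos h.symm, if_pos (by omega), if_pos h, hg, ← h, List.getD_eq_getElem?_getD]
          simp [List.getElem?_eq_getElem (show i < bs.length by omega)]
        · rw [if_neg (fun hh => h hh.symm), if_neg h, List.getD_eq_getElem?_getD]
      rw [hgetset]
      rw [List.filter_cons]
      by_cases h : i = m
      · have e : (PySem.Int.mod ((c.length : Int) - 1) T = (i : Int)) := by rw [← hcl]; omega
        simp [h, e]
      · have e : ¬ (PySem.Int.mod ((c.length : Int) - 1) T = (i : Int)) := by rw [← hcl]; omega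
        simp [h, e]

theorem paScan_eq (unicos : PySem.Set Int) (cand : List Int) (res : List (List Int)) (l : List Int) :
    paScan unicos cand res l =
      (if l.any (fun c => PySem.Set.contains unicos c) then (cand :: res, true) else (res, false)) := by
  induction l with
  | nil => rfl
  | cons c rest ih =>
      simp only [paScan, List.any_cons]
      by_cases h : c ∈ unicos
      · simp [h]
      · simp [h, ih]

theorem paStep_eq (unicos : PySem.Set Int) (res : List (List Int)) (cand : List Int) :
    paStep unicos res cand =
      if cand.any (fun c => PySem.Set.contains unicos c) then cand :: res else res ++ [cand] := by
  simp only [paStep, paScan_eq]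
  by_cases h : ∃ x ∈ cand, x ∈ unicos <;> simp [h]

-- membership bounds of a descending range
theorem mem_pyRange_neg (a b i : Int) (h : i ∈ PySem.List.pyRange a b (-1)) : b < i ∧ i ≤ a := by
  rw [PySem.List.pyRange_neg_one] at h
  simp at h
  obtain ⟨k, hk, rfl⟩ := h
  omega

-- a descending range splits at any interior point
theorem pyRange_split_neg (a m b : Int) (hb : b ≤ m) (hm : m ≤ a) :
    PySem.List.pyRange a b (-1) = PySem.List.pyRange a m (-1) ++ PySem.List.pyRange m b (-1) := by
  rw [PySem.List.pyRange_neg_one, PySem.List.pyRange_neg_one, PySem.List.pyRange_neg_one]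
  have e : (a - b).toNat = (a - m).toNat + (m - b).toNat := by omega
  rw [e, List.range_add, List.map_append, List.map_map]
  congr 1
  apply List.map_congr_left
  intro k hk
  simp only [Function.comp_apply]
  have : ((a - m).toNat : Int) = a - m := by omega
  push_cast
  omega

theorem pyRange_neg_singleton (m : Int) : PySem.List.pyRange m (m - 1) (-1) = [m] := by
  rw [PySem.List.pyRange_neg_one]
  have : (m - (m - 1)).toNat = 1 := by omega
  rw [this]
  simp

-- insertBy passes over a prefix it does not go before
theorem ib_append {α : Type} (before : α → α → Bool) (x : α) (A B : List α)
    (h : ∀ a ∈ A, before x a = false) :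
    PySem.List.insertBy before x (A ++ B) = A ++ PySem.List.insertBy before x B := by
  induction A with
  | nil => simp
  | cons a rest ih =>
      have ha := h a (by simp)
      simp only [List.cons_append, PySem.List.insertBy, ha]
      simp [ih (fun y hy => h y (by simp [hy]))]

-- insertBy goes to the very front of a list it goes before everywhere
theorem ib_all {α : Type} (before : α → α → Bool) (x : α) (B : List α)
    (h : ∀ b ∈ B, before x b = true) :
    PySem.List.insertBy before x B = x :: B := by
  cases B with
  | nil => rfl
  | cons b rest => simp [PySem.List.insertBy, h b (by simp)]

-- the bucket walk of A, as one flat list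
def sbuckets (T : Int) (L : List (List Int)) : List (List Int) :=
  (PySem.List.pyRange (T - 1) 0 (-1)).flatMap
    (fun i => L.filter (fun c => decide (PySem.List.len c - 1 = i)))

theorem sbuckets_nil (T : Int) : sbuckets T [] = [] := by
  simp [sbuckets]

-- appending one candidate inserts it at the end of its own bucket's region
theorem sbuckets_snoc (T : Int) (P : List (List Int)) (x : List Int)
    (hx2 : 2 ≤ (x.length : Int)) (hxT : (x.length : Int) ≤ T) :
    sbuckets T (P ++ [x]) =
      PySem.List.insertBy (fun a b => decide (PySem.List.len b < PySem.List.len a)) x (sbuckets T P) := by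
  have hlx : PySem.List.len x = (x.length : Int) := by simp [PySem.List.len_eq]
  set ℓ : Int := (x.length : Int) with hℓ
  have hsplit1 : PySem.List.pyRange (T - 1) 0 (-1)
      = PySem.List.pyRange (T - 1) (ℓ - 2) (-1) ++ PySem.List.pyRange (ℓ - 2) 0 (-1) :=
    pyRange_split_neg _ _ _ (by omega) (by omega)
  have hsplit2 : PySem.List.pyRange (T - 1) (ℓ - 2) (-1)
      = PySem.List.pyRange (T - 1) (ℓ - 1) (-1) ++ [ℓ - 1] := by
    rw [pyRange_split_neg (T - 1) (ℓ - 1) (ℓ - 2) (by omega) (by omega)]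
    rw [show ℓ - 2 = (ℓ - 1) - 1 by ring, pyRange_neg_singleton]
  have hfx : ∀ (i : Int), (¬ i = ℓ - 1) →
      ([x].filter (fun c => decide (PySem.List.len c - 1 = i))) = [] := by
    intro i hi
    have hi' : ¬ (x.length : Int) - 1 = i := by omega
    simp [PySem.List.len_eq, hi']
  have hfx1 : ([x].filter (fun c => decide (PySem.List.len c - 1 = (ℓ - 1)))) = [x] := by
    simp [PySem.List.len_eq, hℓ]
  unfold sbuckets
  rw [hsplit1, hsplit2]
  simp only [List.flatMap_append, List.flatMap_cons, List.flatMap_nil, List.append_nil]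
  -- the three regions for P ++ [x]
  have hhi : (PySem.List.pyRange (T - 1) (ℓ - 1) (-1)).flatMap
        (fun i => (P ++ [x]).filter (fun c => decide (PySem.List.len c - 1 = i)))
      = (PySem.List.pyRange (T - 1) (ℓ - 1) (-1)).flatMap
        (fun i => P.filter (fun c => decide (PySem.List.len c - 1 = i))) := by
    apply List.flatMap_congr
    intro i hi
    obtain ⟨hi1, hi2⟩ := mem_pyRange_neg _ _ _ hi
    rw [List.filter_append, hfx i (by omega), List.append_nil]
  have hlo : (PySem.List.pyRange (ℓ - 2) 0 (-1)).flatMap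
        (fun i => (P ++ [x]).filter (fun c => decide (PySem.List.len c - 1 = i)))
      = (PySem.List.pyRange (ℓ - 2) 0 (-1)).flatMap
        (fun i => P.filter (fun c => decide (PySem.List.len c - 1 = i))) := by
    apply List.flatMap_congr
    intro i hi
    obtain ⟨hi1, hi2⟩ := mem_pyRange_neg _ _ _ hi
    rw [List.filter_append, hfx i (by omega), List.append_nil]
  have hmid : (P ++ [x]).filter (fun c => decide (PySem.List.len c - 1 = (ℓ - 1)))
      = P.filter (fun c => decide (PySem.List.len c - 1 = (ℓ - 1))) ++ [x] := by
    rw [List.filter_append, hfx1]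
  rw [hhi, hlo, hmid]
  -- the insertBy side
  rw [ib_append _ x
    ((PySem.List.pyRange (T - 1) (ℓ - 1) (-1)).flatMap
        (fun i => P.filter (fun c => decide (PySem.List.len c - 1 = i)))
      ++ P.filter (fun c => decide (PySem.List.len c - 1 = (ℓ - 1))))
    ((PySem.List.pyRange (ℓ - 2) 0 (-1)).flatMap
        (fun i => P.filter (fun c => decide (PySem.List.len c - 1 = i))))
    (by
      intro a ha
      rw [List.mem_append] at ha
      rcases ha with ha | ha
      · rw [List.mem_flatMap] at ha
        obtain ⟨i, hi, hai⟩ := ha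
        obtain ⟨hi1, _⟩ := mem_pyRange_neg _ _ _ hi
        rw [List.mem_filter] at hai
        have := of_decide_eq_true hai.2
        simp only [hlx, decide_eq_false_iff_not, not_lt]
        omega
      · rw [List.mem_filter] at ha
        have := of_decide_eq_true ha.2
        simp only [hlx, decide_eq_false_iff_not, not_lt]
        omega)]
  rw [ib_all _ x _
    (by
      intro b hb
      rw [List.mem_flatMap] at hb
      obtain ⟨i, hi, hbi⟩ := hb
      obtain ⟨_, hi2⟩ := mem_pyRange_neg _ _ _ hi
      rw [List.mem_filter] at hbi
      have := of_decide_eq_true hbi.2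
      simp only [hlx, decide_eq_true_eq]
      omega)]
  simp only [List.append_assoc, List.cons_append, List.nil_append]

-- stable descending sort by length = walking the length buckets from the top
theorem sorted_eq_sbuckets (T : Int) (L : List (List Int))
    (h : ∀ c ∈ L, 2 ≤ (c.length : Int) ∧ (c.length : Int) ≤ T) :
    PySem.List.sorted L (fun c => PySem.List.len c) true = sbuckets T L := by
  rw [PySem.List.sorted_rev_eq_foldl_insertBy]
  induction L using List.reverseRecOn with
  | nil => rw [sbuckets_nil]; rfl
  | append_singleton P x ih =>
      have hx := h x (by simp)
      rw [List.foldl_append, List.foldl_cons, List.foldl_nil]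
      rw [ih (fun c hc => h c (by simp [hc]))]
      rw [sbuckets_snoc T P x hx.1 hx.2]

-- filtering out the length-≤1 candidates does not change any visited bucket
theorem sbuckets_filter (T : Int) (L : List (List Int)) :
    sbuckets T (L.filter (fun c => decide (1 < PySem.List.len c))) = sbuckets T L := by
  unfold sbuckets
  apply List.flatMap_congr
  intro i hi
  obtain ⟨hi1, _⟩ := mem_pyRange_neg _ _ _ hi
  rw [List.filter_filter]
  apply List.filter_congr
  intro c _
  simp
  intro hc
  omega

-- repeated insert-at-front / append over one pass = reversed filter ++ filter of the complement
theorem route_filter (q : List Int → Bool) (P : List (List Int)) :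
    ∀ con sin : List (List Int),
    P.foldl (fun res c => if q c then c :: res else res ++ [c]) (con.reverse ++ sin)
    = (con ++ P.filter q).reverse ++ (sin ++ P.filter (fun c => !q c)) := by
  induction P with
  | nil => intro con sin; simp
  | cons c rest ih =>
      intro con sin
      simp only [List.foldl_cons, List.filter_cons]
      by_cases h : q c
      · simp only [h, if_pos]
        have e : c :: (con.reverse ++ sin) = (con ++ [c]).reverse ++ sin := by simp
        rw [e, ih (con ++ [c]) sin]
        simp
      · simp only [h, Bool.false_eq_true, if_neg, not_false_iff]
        have e : (con.reverse ++ sin) ++ [c] = con.reverse ++ (sin ++ [c]) := by simp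
        rw [e, ih con (sin ++ [c])]
        simp

-- A and B on the empty candidate list (any cantidadTareas)
theorem a_nil (T : Int) : ordenarCandidatos [] T = [] := by
  simp only [ordenarCandidatos, paPass1, List.foldl_nil]
  rw [PySem.List.foldl_congr_mem _ _ (fun (res : List (List Int)) (_ : Int) => res) _
      (fun acc i _ => by rw [pyGetD_map_nil]; rfl)]
  rw [PySem.List.foldl_ignore]

theorem b_nil (T : Int) : ordenarCandidatos_alt [] T = [] := by
  rfl

-- ===== VERDICT (by name: the statement is the Claim_ definition above) =====
theorem ordenarCandidatos_spec : Claim_equal_ordenarCandidatos := by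
  intro candidatos T _hdom hpre
  unfold Spec_ordenarCandidatos
  rcases hpre with hnil | ⟨hT, hc⟩
  · subst hnil
    rw [a_nil, b_nil]
  · have hTn : ((T.toNat : Nat) : Int) = T := by omega
    -- the flattened counted-task list and its bounds
    set tasks := candidatos.flatMap
        (fun c => c.filter (fun t => decide (t ≠ PySem.List.pyGetD c 0 0))) with htasks
    have hLb : ∀ t ∈ tasks, 1 - T ≤ t ∧ t ≤ T := by
      intro t ht
      rw [htasks, List.mem_flatMap] at ht
      obtain ⟨c, hcm, htc⟩ := ht
      rw [List.mem_filter] at htc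
      have hne : t ≠ c.headI := by
        have h2 := htc.2
        rw [pyGetD_zero_headI] at h2
        simpa using h2
      exact (hc c hcm).2 t htc.1 hne
    -- pass 1 of A is two independent folds
    have hsplit : paPass1 T candidatos =
        (candidatos.foldl (fun bs c => PySem.List.pySetD bs (PySem.List.len c - 1)
            (PySem.List.pyGetD bs (PySem.List.len c - 1) [] ++ [c]))
          ((PySem.List.pyRange 0 T 1).map (fun _ => [])),
         candidatos.foldl (fun (ct : List Int) (c : List Int) => c.foldl (fun ct t =>
            if t ≠ PySem.List.pyGetD c 0 0 then
              PySem.List.pySetD ct (t - 1) (PySem.List.pyGetD ct (t - 1) 0 + 1)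
            else ct) ct) (PySem.List.pyRepeat [0] T)) := by
      unfold paPass1
      rw [PySem.List.foldl_prod_mk
        (f := fun bs (c : List Int) => PySem.List.pySetD bs (PySem.List.len c - 1)
            (PySem.List.pyGetD bs (PySem.List.len c - 1) [] ++ [c]))
        (g := fun ct (c : List Int) => c.foldl (fun ct t =>
            if t ≠ PySem.List.pyGetD c 0 0 then
              PySem.List.pySetD ct (t - 1) (PySem.List.pyGetD ct (t - 1) 0 + 1)
            else ct) ct)]
    -- the contador fold, flattened
    have hctrFlat : candidatos.foldl (fun (ct : List Int) (c : List Int) => c.foldl (fun ct t =>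
            if t ≠ PySem.List.pyGetD c 0 0 then
              PySem.List.pySetD ct (t - 1) (PySem.List.pyGetD ct (t - 1) 0 + 1)
            else ct) ct) (PySem.List.pyRepeat ([0] : List Int) T)
        = tasks.foldl
            (fun (ct : List Int) (t : Int) => PySem.List.pySetD ct (t - 1) (PySem.List.pyGetD ct (t - 1) 0 + 1))
            (PySem.List.pyRepeat ([0] : List Int) T) := by
      rw [htasks, List.foldl_flatMap]
      apply PySem.List.foldl_congr_mem
      intro acc c _
      rw [PySem.List.foldl_ite_eq_foldl_filter
        (p := fun t => t ≠ PySem.List.pyGetD c 0 0)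
        (f := fun ct t => PySem.List.pySetD ct (t - 1) (PySem.List.pyGetD ct (t - 1) 0 + 1))]
    have hctrLen := ctr_len T hT tasks
      (PySem.List.pyRepeat ([0] : List Int) T)
      (by rw [PySem.List.pyRepeat_singleton]; simp) (fun t ht => hLb t ht)
    -- B's counter is the same fold, so the two 'unique tasks' sets coincide
    have hctrB : pbContador candidatos T
        = tasks.foldl
            (fun (ct : List Int) (t : Int) => PySem.List.pySetD ct (t - 1) (PySem.List.pyGetD ct (t - 1) 0 + 1))
            (PySem.List.pyRepeat ([0] : List Int) T) := by
      unfold pbContador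
      exact hctrFlat
    have huni : paUnicos (tasks.foldl
            (fun (ct : List Int) (t : Int) => PySem.List.pySetD ct (t - 1) (PySem.List.pyGetD ct (t - 1) 0 + 1))
            (PySem.List.pyRepeat ([0] : List Int) T))
        = pbUnicos T (pbContador candidatos T) := by
      rw [hctrB]
      unfold paUnicos pbUnicos
      rw [PySem.List.len_eq, hctrLen, hTn]
    -- the buckets hold exactly the candidates of each length
    obtain ⟨hbLen, hbGet⟩ := bkt_spec T hT candidatos
      ((PySem.List.pyRange 0 T 1).map (fun _ => ([] : List (List Int))))
      (by simp [PySem.List.length_pyRange_one]) (fun c hm => (hc c hm).1.2)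
    have hbGet' : ∀ i : Int, 1 ≤ i → i ≤ T - 1 →
        PySem.List.pyGetD (candidatos.foldl (fun bs c => PySem.List.pySetD bs (PySem.List.len c - 1)
            (PySem.List.pyGetD bs (PySem.List.len c - 1) [] ++ [c]))
          ((PySem.List.pyRange 0 T 1).map (fun _ => ([] : List (List Int))))) i []
        = candidatos.filter (fun c => decide (PySem.List.len c - 1 = i)) := by
      intro i hi1 hi2
      have hbleni : ((candidatos.foldl (fun bs c => PySem.List.pySetD bs (PySem.List.len c - 1)
            (PySem.List.pyGetD bs (PySem.List.len c - 1) [] ++ [c]))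
          ((PySem.List.pyRange 0 T 1).map (fun _ => ([] : List (List Int))))).length : Int) = T := by
        rw [hbLen]; omega
      have hg := wrapGet T _ i ([] : List (List Int)) hbleni (by omega) (by omega)
      have hmi : PySem.Int.mod i T = i := mod_small T i (by omega) (by omega)
      rw [hg, hmi, hbGet i.toNat (by omega), getD_map_nil]
      have hcast : ((i.toNat : Nat) : Int) = i := by omega
      rw [hcast, List.nil_append]
      apply List.filter_congr
      intro c hcm
      have hlen1 : 1 ≤ (c.length : Int) := by have := (hc c hcm).1.1; omega
      have hlenT : (c.length : Int) ≤ T := (hc c hcm).1.2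
      have hcl : PySem.List.len c = (c.length : Int) := by simp [PySem.List.len_eq]
      have hme : PySem.Int.mod (PySem.List.len c - 1) T = PySem.List.len c - 1 := by
        rw [hcl]; exact mod_small T _ (by omega) (by omega)
      rw [hme]
    -- assemble
    simp only [ordenarCandidatos, ordenarCandidatos_alt, hsplit]
    rw [hctrFlat]
    have hlenb : PySem.List.len (candidatos.foldl (fun bs c => PySem.List.pySetD bs (PySem.List.len c - 1)
            (PySem.List.pyGetD bs (PySem.List.len c - 1) [] ++ [c]))
          ((PySem.List.pyRange 0 T 1).map (fun _ => ([] : List (List Int))))) - 1 = T - 1 := by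
      rw [PySem.List.len_eq, hbLen, hTn]
    rw [hlenb]
    -- the same membership test on both sides
    set q : List Int → Bool :=
      fun cand => cand.any (fun t => PySem.Set.contains (pbUnicos T (pbContador candidatos T)) t) with hq
    have hstep : paStep (paUnicos (tasks.foldl
            (fun (ct : List Int) (t : Int) => PySem.List.pySetD ct (t - 1) (PySem.List.pyGetD ct (t - 1) 0 + 1))
            (PySem.List.pyRepeat ([0] : List Int) T)))
        = (fun res cand => if q cand then cand :: res else res ++ [cand]) := by
      funext res cand
      rw [paStep_eq, huni, hq]
    rw [hstep]
    -- A's walk over the buckets is a single route over the flattened bucket list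
    rw [PySem.List.foldl_congr_mem _ _
      (fun res i => (candidatos.filter (fun c => decide (PySem.List.len c - 1 = i))).foldl
        (fun res cand => if q cand then cand :: res else res ++ [cand]) res) _
      (by
        intro acc i hi
        obtain ⟨hi1, hi2⟩ := mem_pyRange_neg _ _ _ hi
        rw [hbGet' i (by omega) (by omega)])]
    rw [← List.foldl_flatMap]
    -- the flattened bucket list is B's sorted processing order
    have horden : PySem.List.sorted (candidatos.filter (fun c => decide (1 < PySem.List.len c)))
        (fun c => PySem.List.len c) true
        = (PySem.List.pyRange (T - 1) 0 (-1)).flatMap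
            (fun i => candidatos.filter (fun c => decide (PySem.List.len c - 1 = i))) := by
      rw [sorted_eq_sbuckets T _
        (by
          intro c hcm
          rw [List.mem_filter] at hcm
          have h1 := of_decide_eq_true hcm.2
          rw [PySem.List.len_eq] at h1
          exact ⟨by omega, (hc c hcm.1).1.2⟩)]
      rw [sbuckets_filter]
      rfl
    rw [← horden]
    -- route = reversed 'unique' filter ++ the rest
    have hroute := route_filter q
      (PySem.List.sorted (candidatos.filter (fun c => decide (1 < PySem.List.len c)))
        (fun c => PySem.List.len c) true) [] []
    simpa only [List.reverse_nil, List.nil_append] using hroute
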